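-- pv_equiv track=rewrite | github.com/lizazim/TraQuLA | src/process_question.py | check_where_delimiter
-- ===== SOURCE A (Python) =====
-- def check_where_delimiter(words):
--   words_lower = [x.lower() for x in words]
--   phrase = " ".join(words_lower)
--   if ("is also" in phrase or "are also" in phrase or "was also" in phrase or "were also" in phrase) and "where" in words:
--     where_indexes = [i for i,val in enumerate(words) if val == "where"]
--     independent_where = []
--     for i in where_indexes:
--       phrase_after_where = " ".join(words_lower[i:])
--       if ("is also" in phrase_after_where or "are also" in phrase_after_where or "was also" in phrase_after_where or "were also" in phrase_after_where):
--         independent_where.append(i)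
--         return (independent_where[0], independent_where[0])
--   else:
--     return ()
-- ===== SOURCE B (Python) =====
-- PHRASES = ("is also", "are also", "was also", "were also")
--
-- def _has_also(s):
--     return any(p in s for p in PHRASES)
--
-- def check_where_delimiter(words):
--     phrase = " ".join(w.lower() for w in words)
--     if not _has_also(phrase) or "where" not in words:
--         return ()
--     i = words.index("where")
--     after = " ".join(w.lower() for w in words[i:])
--     if _has_also(after):
--         return (i, i)
--     return None
-- ===== Notes on version B (the rewrite author's own statement) =====
-- stated objective: simpler
-- what changed: B drops the loop over all 'where' positions and the independent_where accumulator: since suffixes of later 'where's are substrings of the first one's suffix, only the first 'where' (words.index) is tested once.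
import Mathlib
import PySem

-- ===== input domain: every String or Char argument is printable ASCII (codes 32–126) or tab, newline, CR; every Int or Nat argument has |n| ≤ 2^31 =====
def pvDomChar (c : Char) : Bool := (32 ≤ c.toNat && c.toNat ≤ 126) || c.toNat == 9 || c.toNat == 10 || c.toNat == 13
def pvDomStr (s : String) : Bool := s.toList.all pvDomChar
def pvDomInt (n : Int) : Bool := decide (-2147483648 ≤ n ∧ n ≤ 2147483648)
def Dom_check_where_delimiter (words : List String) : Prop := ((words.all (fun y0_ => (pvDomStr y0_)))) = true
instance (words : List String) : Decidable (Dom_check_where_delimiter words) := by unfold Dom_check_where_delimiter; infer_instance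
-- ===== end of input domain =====

-- B replaces the loop over all 'where' positions (and the independent_where accumulator) by a single
-- test of the first 'where' suffix, since later suffixes are substrings of it; objective: simpler.


-- ===== PORT A =====
-- the four-way '… also' substring test A writes out inline
def alsoGuard (s : String) : Bool :=
  PySem.Str.isIn "is also" s || PySem.Str.isIn "are also" s ||
  PySem.Str.isIn "was also" s || PySem.Str.isIn "were also" s

-- A's 'for i in where_indexes' loop, carrying the independent_where accumulator
def whereLoop (wl : List String) (acc : List Int) : List Int → Option (List Int)
  | [] => none
  | i :: rest =>
    if alsoGuard (PySem.Str.join " " (PySem.List.slice wl (some i) none)) then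
      match PySem.List.pyGet? (acc ++ [i]) 0 with   -- independent_where[0] (never raises: just appended)
      | some v => some [v, v]
      | none => none
    else whereLoop wl acc rest

def check_where_delimiter (words : List String) : Option (List Int) :=
  let words_lower := words.map PySem.Str.lower
  let phrase := PySem.Str.join " " words_lower
  if alsoGuard phrase && words.contains "where" then
    let where_indexes := (PySem.List.enumerate words 0).filterMap
      (fun p => if p.2 = "where" then some p.1 else none)
    whereLoop words_lower [] where_indexes
  else some []

-- ===== PORT B =====
def pvPhrases : List String := ["is also", "are also", "was also", "were also"]

def hasAlso (s : String) : Bool := pvPhrases.any (fun p => PySem.Str.isIn p s)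

def check_where_delimiter_alt (words : List String) : Option (List Int) :=
  let phrase := PySem.Str.join " " (words.map PySem.Str.lower)
  if !hasAlso phrase || !words.contains "where" then some []
  else
    match PySem.List.index? words "where" with
    | none => none   -- unreachable: the guard ensured "where" ∈ words
    | some i =>
      let after := PySem.Str.join " " ((PySem.List.slice words (some (i : Int)) none).map PySem.Str.lower)
      if hasAlso after then some [(i : Int), (i : Int)] else none

-- ===== PRECONDITION & SPEC =====
def Spec_check_where_delimiter (words : List String) (out : Option (List Int)) : Prop := out = check_where_delimiter_alt words
instance (words : List String) (out : Option (List Int)) : Decidable (Spec_check_where_delimiter words out) := by unfold Spec_check_where_delimiter; infer_instance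

-- ===== CLAIM (what is proved, stated in full; the proofs are below) =====
def Claim_equal_check_where_delimiter : Prop := ∀ (words : List String), Dom_check_where_delimiter words → Spec_check_where_delimiter words (check_where_delimiter words)

-- ===== LEMMAS AND PROOFS =====

theorem hasAlso_eq (s : String) : hasAlso s = alsoGuard s := by
  simp [hasAlso, pvPhrases, alsoGuard, List.any, Bool.or_assoc]

-- the tail join is a suffix of the join
theorem join_tail_suffix (l : List (List Char)) :
    PySem.Chars.join (" ".toList) l.tail <:+ PySem.Chars.join (" ".toList) l := by
  match l with
  | [] => simp
  | [x] => simp [PySem.Chars.join_singleton]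
  | x :: y :: r =>
    rw [PySem.Chars.join_cons_cons]
    exact ⟨x ++ " ".toList, by simp⟩

theorem alsoGuard_suffix_mono {t s : String} (h : t.toList <:+ s.toList)
    (ht : alsoGuard t = true) : alsoGuard s = true := by
  simp only [alsoGuard, Bool.or_eq_true, PySem.Str.isIn_iff_infix] at ht ⊢
  rcases ht with ((h1 | h1) | h1) | h1
  · exact Or.inl (Or.inl (Or.inl (h1.trans h.isInfix)))
  · exact Or.inl (Or.inl (Or.inr (h1.trans h.isInfix)))
  · exact Or.inl (Or.inr (h1.trans h.isInfix))
  · exact Or.inr (h1.trans h.isInfix)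

theorem join_drop_succ_suffix (wl : List String) (m : Nat) :
    (PySem.Str.join " " (wl.drop (m+1))).toList <:+ (PySem.Str.join " " (wl.drop m)).toList := by
  rw [PySem.Str.toList_join, PySem.Str.toList_join, List.map_drop, List.map_drop, ← List.tail_drop]
  exact join_tail_suffix _

-- monotonicity over the drop index
theorem alsoGuard_drop_mono (wl : List String) (n : Nat) :
    ∀ (m : Nat), n ≤ m → alsoGuard (PySem.Str.join " " (wl.drop m)) = true →
      alsoGuard (PySem.Str.join " " (wl.drop n)) = true := by
  intro m
  induction m with
  | zero => intro hnm h; simpa [Nat.le_zero.mp hnm] using h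
  | succ m ih =>
    intro hnm h
    rcases Nat.lt_or_ge n (m+1) with hlt | hge
    · exact ih (by omega) (alsoGuard_suffix_mono (join_drop_succ_suffix wl m) h)
    · have hnm1 : n = m + 1 := by omega
      simpa [hnm1] using h

-- the loop returns none when already the first where's suffix fails the test
theorem whereLoop_none (wl : List String) (acc : List Int) (i : Int) (hi : 0 ≤ i)
    (hfail : alsoGuard (PySem.Str.join " " (PySem.List.slice wl (some i) none)) = false) :
    ∀ (is_ : List Int), (∀ j ∈ is_, i ≤ j) → whereLoop wl acc is_ = none := by
  intro is_
  induction is_ with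
  | nil => intro _; rfl
  | cons j rest ih =>
    intro hall
    have hij : i ≤ j := hall j (List.mem_cons_self ..)
    have hj : 0 ≤ j := le_trans hi hij
    have hjfail : alsoGuard (PySem.Str.join " " (PySem.List.slice wl (some j) none)) = false := by
      by_contra hc
      have hjt := Bool.not_eq_false _ |>.mp hc
      rw [PySem.List.slice_from wl hj] at hjt
      rw [PySem.List.slice_from wl hi] at hfail
      have := alsoGuard_drop_mono wl i.toNat j.toNat (by omega) hjt
      simp [this] at hfail
    rw [whereLoop, hjfail]
    simp only [Bool.false_eq_true, if_false]
    exact ih (fun j hj => hall j (List.mem_cons_of_mem _ hj))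

-- every produced where-index is at least the start offset
theorem wi_lb (ws : List String) : ∀ (s j : Int),
    j ∈ (PySem.List.enumerate ws s).filterMap (fun p => if p.2 = "where" then some p.1 else none) →
      s ≤ j := by
  induction ws with
  | nil => intro s j h; simp [PySem.List.enumerate_nil] at h
  | cons w ws ih =>
    intro s j h
    rw [PySem.List.enumerate_cons, List.filterMap_cons] at h
    by_cases hw : w = "where"
    · simp only [hw] at h
      rcases List.mem_cons.mp h with h | h
      · omega
      · have := ih (s+1) j h; omega
    · simp only [if_neg hw] at h
      have := ih (s+1) j h; omega

-- where_indexes characterised by list.index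
theorem wi_spec (ws : List String) : ∀ (s : Int),
    (match PySem.List.index? ws "where" with
     | none => (PySem.List.enumerate ws s).filterMap
         (fun p => if p.2 = "where" then some p.1 else none) = []
     | some k => ∃ rest, (PySem.List.enumerate ws s).filterMap
         (fun p => if p.2 = "where" then some p.1 else none) = (s + (k : Int)) :: rest ∧
         ∀ j ∈ rest, s + (k : Int) < j) := by
  induction ws with
  | nil => intro s; simp [PySem.List.enumerate_nil, PySem.List.index?]
  | cons w ws ih =>
    intro s
    by_cases hw : w = "where"
    · subst hw
      rw [PySem.List.index?_cons_self]
      refine ⟨(PySem.List.enumerate ws (s+1)).filterMap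
        (fun p => if p.2 = "where" then some p.1 else none), ?_, ?_⟩
      · rw [PySem.List.enumerate_cons, List.filterMap_cons]
        simp
      · intro j hj
        have := wi_lb ws (s+1) j hj
        omega
    · rw [PySem.List.index?_cons_of_ne ws hw, PySem.List.enumerate_cons, List.filterMap_cons]
      simp only [if_neg hw]
      have h := ih (s+1)
      cases hidx : PySem.List.index? ws "where" with
      | none => rw [hidx] at h; simpa using h
      | some k =>
        rw [hidx] at h
        obtain ⟨rest, hrw, hrb⟩ := h
        refine ⟨rest, ?_, ?_⟩
        · rw [hrw]; congr 1; push_cast; ring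
        · intro j hj
          have := hrb j hj
          push_cast
          omega

-- ===== VERDICT (by name: the statement is the Claim_ definition above) =====
theorem check_where_delimiter_spec : Claim_equal_check_where_delimiter := by
  unfold Claim_equal_check_where_delimiter
  intro words _
  unfold Spec_check_where_delimiter check_where_delimiter check_where_delimiter_alt
  simp only [hasAlso_eq]
  by_cases hg : alsoGuard (PySem.Str.join " " (words.map PySem.Str.lower)) = true
  · by_cases hc : words.contains "where" = true
    · simp only [hg, hc, Bool.and_self, Bool.not_true, Bool.or_self, if_true,
        Bool.false_eq_true, if_false]
      have hmem : "where" ∈ words := by simpa using hc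
      obtain ⟨k, hk⟩ : ∃ k, PySem.List.index? words "where" = some k := by
        have := (PySem.List.index?_isSome_iff (xs := words) (v := "where")).mpr hmem
        exact Option.isSome_iff_exists.mp this
      have hspec := wi_spec words 0
      rw [hk] at hspec
      obtain ⟨rest, hrw, hrb⟩ := hspec
      simp only [zero_add] at hrw hrb
      rw [hk, hrw, whereLoop]
      have hsame : PySem.Str.join " " (PySem.List.slice (words.map PySem.Str.lower) (some (k : Int)) none)
          = PySem.Str.join " " ((PySem.List.slice words (some (k : Int)) none).map PySem.Str.lower) := by
        rw [PySem.List.slice_from _ (by positivity), PySem.List.slice_from _ (by positivity),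
          List.map_drop]
      rw [hsame]
      by_cases ha : alsoGuard (PySem.Str.join " " ((PySem.List.slice words (some (k : Int)) none).map PySem.Str.lower)) = true
      · simp only [ha, if_true]
        simp [PySem.List.pyGet?, PySem.List.pyIdx?]
      · rw [Bool.not_eq_true] at ha
        simp only [ha, Bool.false_eq_true, if_false]
        rw [← hsame] at ha
        rw [whereLoop_none (words.map PySem.Str.lower) [] (k : Int) (by positivity)
          ha rest (fun j hj => le_of_lt (hrb j hj))]
    · have hnm : "where" ∉ words := by simpa using hc
      simp [hg, hnm]
  · simp [Bool.not_eq_true _ |>.mp hg]
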